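-- pv_equiv track=rewrite | github.com/yesmesalman/gitpython | gitpython_script/index.py | get_file_directory
-- ===== SOURCE A (Python) =====
-- def get_file_directory(filename):
--     arr = filename.split('/')
--     dir = '/'
--
--     if(len(arr) != 1):
--         dir = ''
--         for d in arr[:-1]:
--             dir += d+"/"
--
--     return [arr[(len(arr) - 1)], dir]
-- ===== SOURCE B (Python) =====
-- def get_file_directory(filename):
--     idx = filename.rfind('/')
--     if idx == -1:
--         return [filename, '/']
--     return [filename[idx+1:], filename[:idx+1]]
-- ===== Notes on version B (the rewrite author's own statement) =====
-- stated objective: simpler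
-- what changed: Replaces splitting on slashes plus an accumulation loop that rebuilds the directory with a single rfind for the last slash and two slices of the original string, keeping the slash-only default for slash-free inputs.
import Mathlib
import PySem

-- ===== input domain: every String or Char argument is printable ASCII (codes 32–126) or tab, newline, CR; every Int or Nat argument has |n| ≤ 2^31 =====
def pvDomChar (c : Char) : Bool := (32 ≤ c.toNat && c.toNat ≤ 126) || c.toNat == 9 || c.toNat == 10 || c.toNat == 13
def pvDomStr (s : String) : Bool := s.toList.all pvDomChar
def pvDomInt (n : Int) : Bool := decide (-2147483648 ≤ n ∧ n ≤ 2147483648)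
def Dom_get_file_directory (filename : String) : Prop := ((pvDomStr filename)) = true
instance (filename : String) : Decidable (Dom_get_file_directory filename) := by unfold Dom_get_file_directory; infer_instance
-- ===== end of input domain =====

-- B replaces split('/') + a directory-rebuilding loop with one rfind for the last slash and two slices (objective: simpler).


-- ===== PORT A =====
def get_file_directory (filename : String) : List String :=
  let arr : List String := (PySem.Str.split? filename "/").getD []
  let dir : String := "/"
  let dir : String :=
    if arr.length ≠ 1 then
      (PySem.List.slice arr none (some (-1))).foldl (fun dir d => dir ++ (d ++ "/")) ""
    else dir
  [(PySem.List.pyGet? arr ((arr.length : Int) - 1)).getD "", dir]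

-- ===== PORT B =====
def get_file_directory_alt (filename : String) : List String :=
  let idx := PySem.Str.rfind filename "/"
  if idx = -1 then [filename, "/"]
  else [PySem.Str.slice filename (some (idx + 1)) none,
        PySem.Str.slice filename none (some (idx + 1))]

-- ===== PRECONDITION & SPEC =====
def Spec_get_file_directory (filename : String) (out : List String) : Prop := out = get_file_directory_alt filename
instance (filename : String) (out : List String) : Decidable (Spec_get_file_directory filename out) := by unfold Spec_get_file_directory; infer_instance

-- ===== CLAIM (what is proved, stated in full; the proofs are below) =====
def Claim_equal_get_file_directory : Prop := ∀ (filename : String), Dom_get_file_directory filename → Spec_get_file_directory filename (get_file_directory filename)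

-- ===== LEMMAS AND PROOFS =====

-- reference split-on-'/' accumulator, used only in the proofs
def pvSplitSlash : List Char → List Char → List (List Char)
  | [], cur => [cur.reverse]
  | c :: rest, cur => if c = '/' then cur.reverse :: pvSplitSlash rest [] else pvSplitSlash rest (c :: cur)

theorem pv_isPrefixOf_slash (l : List Char) :
    List.isPrefixOf ['/'] l = true ↔ ∃ t, l = '/' :: t := by
  rw [List.isPrefixOf_iff_prefix]
  constructor
  · rintro ⟨t, ht⟩; exact ⟨t, ht.symm⟩
  · rintro ⟨t, rfl⟩; exact ⟨t, rfl⟩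

theorem pv_go_eq_splitSlash (l : List Char) : ∀ (fuel : Nat) (cur : List Char) (acc : List (List Char)),
    l.length ≤ fuel →
    PySem.Chars.splitOn.go ['/'] fuel l cur acc = acc.reverse ++ pvSplitSlash l cur := by
  induction l with
  | nil =>
    intro fuel cur acc _
    cases fuel <;> simp [PySem.Chars.splitOn.go, pvSplitSlash]
  | cons c rest ih =>
    intro fuel cur acc hle
    cases fuel with
    | zero => simp at hle
    | succ n =>
      by_cases hc : c = '/'
      · have hpre : List.isPrefixOf ['/'] (c :: rest) = true := by
          rw [pv_isPrefixOf_slash]; exact ⟨rest, by rw [hc]⟩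
        have hdrop : List.drop ['/'].length (c :: rest) = rest := by simp
        simp only [PySem.Chars.splitOn.go, hpre, if_pos, hdrop]
        rw [ih n [] (cur.reverse :: acc) (by simpa using Nat.le_of_succ_le_succ hle)]
        simp [pvSplitSlash, hc]
      · have hpre : ¬ List.isPrefixOf ['/'] (c :: rest) = true := by
          rw [pv_isPrefixOf_slash]; rintro ⟨t, h⟩; injection h with h1 _; exact hc h1
        simp only [PySem.Chars.splitOn.go, hpre]
        rw [ih n (c :: cur) acc (by simpa using Nat.le_of_succ_le_succ hle)]
        simp [pvSplitSlash, hc]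

theorem pv_splitOn_eq (cs : List Char) :
    PySem.Chars.splitOn cs ['/'] = pvSplitSlash cs [] := by
  unfold PySem.Chars.splitOn
  rw [pv_go_eq_splitSlash cs (cs.length + 1) [] [] (by omega)]
  simp

theorem pv_splitSlash_no_slash (l : List Char) (h : '/' ∉ l) : ∀ cur,
    pvSplitSlash l cur = [cur.reverse ++ l] := by
  induction l with
  | nil => intro cur; simp [pvSplitSlash]
  | cons c rest ih =>
    intro cur
    have hc : c ≠ '/' := fun hc => h (by simp [hc])
    simp only [pvSplitSlash, if_neg hc]
    rw [ih (fun hm => h (by simp [hm]))]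
    simp

theorem pv_splitSlash_append (u v : List Char) : ∀ cur,
    pvSplitSlash (u ++ '/' :: v) cur = pvSplitSlash u cur ++ pvSplitSlash v [] := by
  induction u with
  | nil => intro cur; simp [pvSplitSlash]
  | cons c rest ih =>
    intro cur
    by_cases hc : c = '/' <;> simp [pvSplitSlash, hc, ih]

theorem pv_splitSlash_length_pos (l : List Char) : ∀ cur, 1 ≤ (pvSplitSlash l cur).length := by
  induction l with
  | nil => intro cur; simp [pvSplitSlash]
  | cons c rest ih =>
    intro cur
    by_cases hc : c = '/'
    · simp only [pvSplitSlash, if_pos hc, List.length_cons]; omega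
    · simp only [pvSplitSlash, if_neg hc]; exact ih _

theorem pv_fold_dir (u : List Char) : ∀ (cur : List Char) (d : String),
    (((pvSplitSlash u cur).map String.ofList).foldl (fun a p => a ++ (p ++ "/")) d).toList
      = d.toList ++ cur.reverse ++ u ++ ['/'] := by
  induction u with
  | nil => intro cur d; simp [pvSplitSlash]
  | cons c rest ih =>
    intro cur d
    by_cases hc : c = '/'
    · simp only [pvSplitSlash, if_pos hc, List.map_cons, List.foldl_cons]
      rw [ih [] (d ++ (String.ofList cur.reverse ++ "/"))]
      simp [hc]
    · simp only [pvSplitSlash, if_neg hc]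
      rw [ih (c :: cur) d]
      simp

theorem pv_rfind_go_no_slash (cs : List Char) (h : '/' ∉ cs) : ∀ j,
    PySem.Chars.rfind.go cs ['/'] j = -1 := by
  have hpre : ∀ k, ¬ List.isPrefixOf ['/'] (cs.drop k) = true := by
    intro k hk
    rw [pv_isPrefixOf_slash] at hk
    obtain ⟨t, ht⟩ := hk
    exact h (List.mem_of_mem_drop (l := cs) (i := k) (by rw [ht]; simp))
  intro j
  induction j with
  | zero =>
    have := hpre 0
    simp only [List.drop_zero] at this
    simp [PySem.Chars.rfind.go, this]
  | succ n ih =>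
    simp [PySem.Chars.rfind.go, hpre (n + 1), ih]

theorem pv_rfind_go_slash (u v : List Char) (h : '/' ∉ v) : ∀ j, u.length ≤ j →
    PySem.Chars.rfind.go (u ++ '/' :: v) ['/'] j = (u.length : Int) := by
  intro j
  induction j with
  | zero =>
    intro hle
    have hu : u = [] := List.eq_nil_of_length_eq_zero (by omega)
    subst hu
    have : List.isPrefixOf ['/'] ([] ++ '/' :: v) = true := by
      rw [pv_isPrefixOf_slash]; exact ⟨v, rfl⟩
    simp [PySem.Chars.rfind.go, this]
  | succ n ih =>
    intro hle
    by_cases he : u.length = n + 1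
    · have : (u ++ '/' :: v).drop (n + 1) = '/' :: v := by
        rw [← he, List.drop_append_of_le_length (by omega)]
        simp
      have hpre : List.isPrefixOf ['/'] ((u ++ '/' :: v).drop (n + 1)) = true := by
        rw [this, pv_isPrefixOf_slash]; exact ⟨v, rfl⟩
      simp [PySem.Chars.rfind.go, hpre, he]
    · have hlt : u.length ≤ n := by omega
      have hdrop : (u ++ '/' :: v).drop (n + 1) = v.drop (n - u.length) := by
        rw [List.drop_append]
        have hnil : u.drop (n + 1) = [] := List.drop_eq_nil_of_le (by omega)
        have h2 : n + 1 - u.length = (n - u.length) + 1 := by omega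
        rw [hnil, h2, List.drop_succ_cons, List.nil_append]
      have hpre : ¬ List.isPrefixOf ['/'] ((u ++ '/' :: v).drop (n + 1)) = true := by
        rw [hdrop, pv_isPrefixOf_slash]
        rintro ⟨t, ht⟩
        exact h (List.mem_of_mem_drop (l := v) (i := n - u.length) (by rw [ht]; simp))
      simp [PySem.Chars.rfind.go, hpre, ih hlt]

theorem pv_decomp (cs : List Char) :
    '/' ∉ cs ∨ ∃ u v, cs = u ++ '/' :: v ∧ '/' ∉ v := by
  induction cs using List.reverseRecOn with
  | nil => left; simp
  | append_singleton ys c ih =>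
    by_cases hc : c = '/'
    · right; exact ⟨ys, [], by simp [hc], by simp⟩
    · rcases ih with hno | ⟨u, v, heq, hv⟩
      · left
        intro hm
        rcases List.mem_append.mp hm with h1 | h2
        · exact hno h1
        · simp at h2; exact hc h2.symm
      · right
        refine ⟨u, v ++ [c], by rw [heq]; simp, ?_⟩
        intro hm
        rcases List.mem_append.mp hm with h1 | h2
        · exact hv h1
        · simp at h2; exact hc h2.symm

-- ===== VERDICT (by name: the statement is the Claim_ definition above) =====
theorem get_file_directory_spec : Claim_equal_get_file_directory := by
  intro filename _
  unfold Spec_get_file_directory get_file_directory get_file_directory_alt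
  have hsl : "/".toList = ['/'] := rfl
  have harr : (PySem.Str.split? filename "/").getD []
      = (pvSplitSlash filename.toList []).map String.ofList := by
    simp [PySem.Str.split?, PySem.Chars.split?, hsl, pv_splitOn_eq]
  have hrf : PySem.Str.rfind filename "/"
      = PySem.Chars.rfind.go filename.toList ['/'] filename.toList.length := by
    simp [PySem.Str.rfind, PySem.Chars.rfind, hsl]
  rcases pv_decomp filename.toList with hno | ⟨u, v, heq, hv⟩
  · -- no slash in the string
    rw [harr, pv_splitSlash_no_slash _ hno, hrf, pv_rfind_go_no_slash _ hno]
    simp [PySem.List.pyGet?, PySem.List.pyIdx?, String.ofList_toList]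
  · -- last slash after u
    have hparts : pvSplitSlash filename.toList [] =
        pvSplitSlash u [] ++ [v] := by
      rw [heq, pv_splitSlash_append, pv_splitSlash_no_slash _ hv]
      simp
    have hplen : 1 ≤ (pvSplitSlash u []).length := pv_splitSlash_length_pos u []
    have hidx : PySem.Chars.rfind.go filename.toList ['/'] filename.toList.length
        = (u.length : Int) := by
      rw [heq] at *
      exact pv_rfind_go_slash u v hv _ (by simp)
    rw [harr, hparts, hrf, hidx]
    have hlen : ((pvSplitSlash u [] ++ [v]).map String.ofList).length
        = (pvSplitSlash u []).length + 1 := by simp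
    have hne : ((pvSplitSlash u [] ++ [v]).map String.ofList).length ≠ 1 := by
      rw [hlen]; omega
    have hdir : (PySem.List.slice ((pvSplitSlash u [] ++ [v]).map String.ofList)
          none (some (-1))).foldl (fun dir d => dir ++ (d ++ "/")) ""
        = String.ofList (u ++ ['/']) := by
      rw [PySem.List.slice_to_neg_one]
      have hdl : ((pvSplitSlash u [] ++ [v]).map String.ofList).dropLast
          = (pvSplitSlash u []).map String.ofList := by
        simp
      rw [hdl]
      have h := pv_fold_dir u [] ""
      simp only [List.reverse_nil] at h
      have h2 := congrArg String.ofList h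
      rw [String.ofList_toList] at h2
      rw [h2]
      simp
    have hget : PySem.List.pyGet? ((pvSplitSlash u [] ++ [v]).map String.ofList)
          ((((pvSplitSlash u [] ++ [v]).map String.ofList).length : Int) - 1)
        = some (String.ofList v) := by
      rw [hlen]
      have hc : (((pvSplitSlash u []).length + 1 : Nat) : Int) - 1
          = (((pvSplitSlash u []).length : Nat) : Int) := by push_cast; ring
      rw [hc, PySem.List.pyGet?_natCast]
      rw [List.map_append]
      simp only [List.map_cons, List.map_nil]
      have : (pvSplitSlash u []).length = ((pvSplitSlash u []).map String.ofList).length := by simp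
      rw [this, List.getElem?_concat_length]
    have hno1 : ¬ ((u.length : Int) = -1) := by omega
    simp only [if_neg hno1, hdir, hget, Option.getD_some]
    -- B side slices
    have hcast : (u.length : Int) + 1 = ((u.length + 1 : Nat) : Int) := by push_cast; ring
    have hdropv : filename.toList.drop (u.length + 1) = v := by
      rw [heq]
      have h1 : u.length + 1 = u.length + 1 := rfl
      rw [show u.length + 1 = u.length + 1 from rfl, List.drop_append]
      simp
    have htakeu : filename.toList.take (u.length + 1) = u ++ ['/'] := by
      rw [heq, List.take_append]
      simp
    have hs1 : PySem.Str.slice filename (some ((u.length : Int) + 1)) none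
        = String.ofList v := by
      simp only [PySem.Str.slice, PySem.Chars.slice_eq_listSlice, hcast,
        PySem.List.slice_from_natCast, hdropv]
    have hs2 : PySem.Str.slice filename none (some ((u.length : Int) + 1))
        = String.ofList (u ++ ['/']) := by
      simp only [PySem.Str.slice, PySem.Chars.slice_eq_listSlice, hcast,
        PySem.List.slice_to_natCast, htakeu]
    rw [hs1, hs2]
    simp [hne]
    intro hnil
    exfalso
    rw [hnil] at hplen
    simp at hplen
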